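-- pv_equiv track=rewrite | github.com/Philipp1305/hieroglyphic-pattern-analyzer | src/suffixarray.py | find_lcps
-- ===== SOURCE A (Python) =====
-- def build_suffixes(seq: list[int]) -> list[tuple[list[int], int]]:
--     suffixes = [
--         (seq[i:], i) for i in range(len(seq))
--     ]  # Create suffixes with their starting indices
--     suffixes.sort()  # Sort suffixes lexicographically
--     return suffixes
--
-- def lcp_length(
--     a: list[int], b: list[int]
-- ) -> int:  # Compute length of longest common prefix
--     i = 0
--     while i < min(len(a), len(b)) and a[i] == b[i]:
--         i += 1
--     return i
--
-- def find_lcps(seq: list[int], min_length: int) -> list[tuple[int, tuple[int, ...]]]: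
--     suffixes = build_suffixes(seq)
--     lcps: list[tuple[int, tuple[int, ...]]] = []
--
--     for i in range(len(suffixes) - 1):
--         s1, _ = suffixes[i]
--         s2, _ = suffixes[i + 1]
--         length = lcp_length(s1, s2)  # Get LCP length between suffixes
--
--         if (
--             length >= min_length and length > 0
--         ):  # Only consider LCPs above min_length. min_length >= 1
--             prefix = tuple(s1[:length])
--             lcps.append((length, prefix))
--
--     unique: dict[
--         tuple[int, ...], int
--     ] = {}  # Keep only the longest LCP for each unique prefix
--     for length, prefix in lcps:
--         if (
--             prefix not in unique or length > unique[prefix]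
--         ):  # Update if longer LCP found
--             unique[prefix] = length
--
--     sorted_lcps = sorted(
--         unique.items(), key=lambda item: (-item[1], item[0])
--     )  # Sort by length desc, then prefix asc
--     return [(length, prefix) for prefix, length in sorted_lcps]
-- ===== SOURCE B (Python) =====
-- def find_lcps(seq: list[int], min_length: int) -> list[tuple[int, tuple[int, ...]]]:
--     n = len(seq)
--     sa = sorted(range(n), key=lambda i: seq[i:])  # suffix array
--     rank = [0] * n
--     for r, i in enumerate(sa):
--         rank[i] = r
--     # Kasai: adjacent LCPs in O(n) after the sort
--     lcp = [0] * (n - 1)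
--     h = 0
--     for i in range(n):
--         r = rank[i]
--         if r > 0:
--             j = sa[r - 1]
--             while i + h < n and j + h < n and seq[i + h] == seq[j + h]:
--                 h += 1
--             lcp[r - 1] = h
--             if h > 0:
--                 h -= 1
--         else:
--             h = 0
--     found = set()
--     for r in range(n - 1):
--         l = lcp[r]
--         if l >= min_length and l > 0:
--             found.add(tuple(seq[sa[r]:sa[r] + l]))
--     return [(len(p), p) for p in sorted(found, key=lambda p: (-len(p), p))]
-- ===== Notes on version B (the rewrite author's own statement) =====
-- stated objective: faster
-- what changed: B builds a suffix array of indices and computes all adjacent-suffix LCPs with Kasai's rank-based linear-time algorithm (reusing the previous overlap h instead of rescanning each pair from scratch), collects the prefixes into a set instead of A's max-keeping dict, and sorts once at the end.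
import Mathlib
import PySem

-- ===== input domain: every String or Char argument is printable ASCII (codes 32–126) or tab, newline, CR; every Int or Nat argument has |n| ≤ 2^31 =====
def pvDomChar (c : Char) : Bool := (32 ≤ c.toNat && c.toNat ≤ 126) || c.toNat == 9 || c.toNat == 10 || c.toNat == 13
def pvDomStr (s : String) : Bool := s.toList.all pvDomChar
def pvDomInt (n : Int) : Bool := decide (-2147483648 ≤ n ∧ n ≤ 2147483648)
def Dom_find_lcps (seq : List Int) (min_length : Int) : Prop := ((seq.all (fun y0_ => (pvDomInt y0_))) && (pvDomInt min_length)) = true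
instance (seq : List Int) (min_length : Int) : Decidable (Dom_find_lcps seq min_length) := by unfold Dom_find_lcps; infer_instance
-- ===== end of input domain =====

-- B replaces A's per-pair LCP rescans (and max-keeping dict) by Kasai's rank-based
-- linear LCP computation over a suffix array of indices; measurably faster by a constant factor.

-- ===== PORT A =====

-- the `while i < min(len(a), len(b)) and a[i] == b[i]: i += 1` loop of lcp_length
def lcpLoopA (a b : List Int) (i : Nat) : Nat :=
  if h : i < min a.length b.length ∧ a.getD i 0 = b.getD i 0 then
    lcpLoopA a b (i + 1)
  else i
termination_by min a.length b.length - i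

def build_suffixes (seq : List Int) : List (List Int × Int) :=
  PySem.List.sorted2
    ((PySem.List.pyRange 0 (seq.length : Int) 1).map
      (fun i => (PySem.List.slice seq (some i) none, i)))
    Prod.fst Prod.snd

def lcp_length (a b : List Int) : Int := (lcpLoopA a b 0 : Int)

-- the adjacent-pair loop collecting (length, prefix) pairs
def aLcps (seq : List Int) (min_length : Int) : List (Int × List Int) :=
  (PySem.List.pyRange 0 (((build_suffixes seq).length : Int) - 1) 1).foldl
    (fun acc i =>
      let s1 := (PySem.List.pyGetD (build_suffixes seq) i ([], 0)).1
      let s2 := (PySem.List.pyGetD (build_suffixes seq) (i + 1) ([], 0)).1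
      let length := lcp_length s1 s2
      if length ≥ min_length ∧ length > 0 then
        acc ++ [(length, PySem.List.slice s1 none (some length))]
      else acc) []

-- the dict loop keeping the longest LCP per unique prefix
def aUnique (seq : List Int) (min_length : Int) : PySem.Dict (List Int) Int :=
  (aLcps seq min_length).foldl
    (fun (u : PySem.Dict (List Int) Int) lp =>
      if ¬ (u.contains lp.2 = true) ∨ lp.1 > u.getD lp.2 0 then u.insert lp.2 lp.1 else u)
    PySem.Dict.empty

def find_lcps (seq : List Int) (min_length : Int) : List (Int × List Int) :=
  (PySem.List.sorted2 (aUnique seq min_length).items (fun it => -it.2) (fun it => it.1)).map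
    (fun pl => (pl.2, pl.1))

-- ===== PORT B =====

-- the `while i + h < n and j + h < n and seq[i + h] == seq[j + h]: h += 1` loop of Kasai
def kasaiWhile (seq : List Int) (i j : Nat) (h : Nat) : Nat :=
  if hc : i + h < seq.length ∧ j + h < seq.length ∧ seq.getD (i + h) 0 = seq.getD (j + h) 0 then
    kasaiWhile seq i j (h + 1)
  else h
termination_by seq.length - (i + h)

-- sa = sorted(range(n), key=lambda i: seq[i:])
def bSa (seq : List Int) : List Int :=
  PySem.List.sorted (PySem.List.pyRange 0 (seq.length : Int) 1)
    (fun i => PySem.List.slice seq (some i) none)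

-- rank[i] = r for r, i in enumerate(sa)
def bRank (seq : List Int) : List Int :=
  (PySem.List.enumerate (bSa seq) 0).foldl
    (fun (rk : List Int) ri => PySem.List.pySetD rk ri.2 ri.1)
    (PySem.List.pyRepeat [0] (seq.length : Int))

-- one iteration of Kasai's loop body (state: the lcp array and h)
def bKasaiStep (seq : List Int) (st : List Int × Nat) (i : Int) : List Int × Nat :=
  let lcp := st.1
  let h := st.2
  let r := PySem.List.pyGetD (bRank seq) i 0
  if r > 0 then
    let j := PySem.List.pyGetD (bSa seq) (r - 1) 0
    let h' := kasaiWhile seq i.toNat j.toNat h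
    let lcp' := PySem.List.pySetD lcp (r - 1) (h' : Int)
    (lcp', if h' > 0 then h' - 1 else h')
  else (lcp, 0)

-- the lcp array after Kasai's `for i in range(n)` loop
def bLcp (seq : List Int) : List Int :=
  ((PySem.List.pyRange 0 (seq.length : Int) 1).foldl (bKasaiStep seq)
    (PySem.List.pyRepeat [0] ((seq.length : Int) - 1), 0)).1

-- the set of kept prefixes
def bFound (seq : List Int) (min_length : Int) : PySem.Set (List Int) :=
  (PySem.List.pyRange 0 ((seq.length : Int) - 1) 1).foldl
    (fun (s : PySem.Set (List Int)) r =>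
      let l := PySem.List.pyGetD (bLcp seq) r 0
      if l ≥ min_length ∧ l > 0 then
        PySem.Set.add s (PySem.List.slice seq (some (PySem.List.pyGetD (bSa seq) r 0))
          (some (PySem.List.pyGetD (bSa seq) r 0 + l)))
      else s)
    PySem.Set.empty

def find_lcps_alt (seq : List Int) (min_length : Int) : List (Int × List Int) :=
  (PySem.List.sorted2 (bFound seq min_length) (fun p => -(PySem.List.len p)) (fun p => p)).map
    (fun p => (PySem.List.len p, p))

-- ===== PRECONDITION & SPEC =====
def Spec_find_lcps (seq : List Int) (min_length : Int) (out : List (Int × List Int)) : Prop := out = find_lcps_alt seq min_length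
instance (seq : List Int) (min_length : Int) (out : List (Int × List Int)) : Decidable (Spec_find_lcps seq min_length out) := by unfold Spec_find_lcps; infer_instance

-- ===== CLAIM (what is proved, stated in full; the proofs are below) =====
def Claim_equal_find_lcps : Prop := ∀ (seq : List Int) (min_length : Int), Dom_find_lcps seq min_length → Spec_find_lcps seq min_length (find_lcps seq min_length)

-- ===== LEMMAS AND PROOFS =====



def lcpNat : List Int → List Int → Nat
  | x :: a, y :: b => if x = y then lcpNat a b + 1 else 0
  | _, _ => 0

theorem lcpNat_nil_left (b : List Int) : lcpNat [] b = 0 := by cases b <;> rfl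
theorem lcpNat_nil_right (a : List Int) : lcpNat a [] = 0 := by cases a <;> rfl

theorem lcpNat_comm (a b : List Int) : lcpNat a b = lcpNat b a := by
  induction a generalizing b with
  | nil => cases b <;> rfl
  | cons x a ih => cases b with
    | nil => rfl
    | cons y b => simp only [lcpNat]; by_cases h : x = y <;> simp [h, ih] <;> omega

theorem lcpNat_le_left (a b : List Int) : lcpNat a b ≤ a.length := by
  induction a generalizing b with
  | nil => simp [lcpNat_nil_left]
  | cons x a ih => cases b with
    | nil => simp [lcpNat]
    | cons y b => simp only [lcpNat]; split <;> simp; exact ih b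

theorem lcpNat_drop_add (a b : List Int) (k : Nat) (h : k ≤ lcpNat a b) :
    lcpNat a b = k + lcpNat (a.drop k) (b.drop k) := by
  induction k generalizing a b with
  | zero => simp
  | succ m ih =>
    cases a with
    | nil => simp [lcpNat_nil_left] at h
    | cons x a => cases b with
      | nil => simp [lcpNat_nil_right] at h
      | cons y b =>
        simp only [lcpNat] at h ⊢
        by_cases hxy : x = y
        · simp only [hxy, if_true] at h ⊢
          have := ih a b (by omega)
          simp [List.drop_succ_cons]
          omega
        · simp [hxy] at h

theorem lcpNat_zero_of_ne_head (x y : Int) (a b : List Int) (h : x ≠ y) :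
    lcpNat (x :: a) (y :: b) = 0 := by simp [lcpNat, h]

theorem lcpLoopA_eq (a b : List Int) (i : Nat) :
    lcpLoopA a b i = i + lcpNat (a.drop i) (b.drop i) := by
  fun_induction lcpLoopA a b i with
  | case1 i hg ih =>
    obtain ⟨hlt, heq⟩ := hg
    have ha : i < a.length := by omega
    have hb : i < b.length := by omega
    rw [ih, List.drop_eq_getElem_cons ha, List.drop_eq_getElem_cons hb]
    have : a[i] = b[i] := by
      rwa [List.getD_eq_getElem _ _ ha, List.getD_eq_getElem _ _ hb] at heq
    simp [lcpNat, this]; omega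
  | case2 i hg =>
    have hz : lcpNat (a.drop i) (b.drop i) = 0 := by
      rcases Nat.lt_or_ge i a.length with ha | ha
      · rcases Nat.lt_or_ge i b.length with hb | hb
        · have hne : a[i] ≠ b[i] := by
            intro hc
            exact hg ⟨by omega, by
              rw [List.getD_eq_getElem _ _ ha, List.getD_eq_getElem _ _ hb]; exact hc⟩
          rw [List.drop_eq_getElem_cons ha, List.drop_eq_getElem_cons hb]
          exact lcpNat_zero_of_ne_head _ _ _ _ hne
        · rw [List.drop_eq_nil_of_le hb, lcpNat_nil_right]
      · rw [List.drop_eq_nil_of_le ha, lcpNat_nil_left]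
    omega

theorem kasaiWhile_eq (seq : List Int) (i j h : Nat) :
    kasaiWhile seq i j h = h + lcpNat ((seq.drop i).drop h) ((seq.drop j).drop h) := by
  fun_induction kasaiWhile seq i j h with
  | case1 h hg ih =>
    obtain ⟨hi, hj, heq⟩ := hg
    rw [ih]
    simp only [List.drop_drop]
    rw [show i + (h + 1) = (i + h) + 1 by omega, show j + (h + 1) = (j + h) + 1 by omega]
    rw [List.drop_eq_getElem_cons (l := seq) (hi : i + h < seq.length),
        List.drop_eq_getElem_cons (l := seq) (hj : j + h < seq.length)]
    have : seq[i+h] = seq[j+h] := by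
      rwa [List.getD_eq_getElem _ _ hi, List.getD_eq_getElem _ _ hj] at heq
    simp [lcpNat, this]
    omega
  | case2 h hg =>
    simp only [List.drop_drop]
    have hz : lcpNat (seq.drop (i + h)) (seq.drop (j + h)) = 0 := by
      rcases Nat.lt_or_ge (i + h) seq.length with hi | hi
      · rcases Nat.lt_or_ge (j + h) seq.length with hj | hj
        · have hne : seq[i+h] ≠ seq[j+h] := by
            intro hc
            apply hg
            refine ⟨hi, hj, ?_⟩
            rw [List.getD_eq_getElem _ _ hi, List.getD_eq_getElem _ _ hj]
            exact hc
          rw [List.drop_eq_getElem_cons hi, List.drop_eq_getElem_cons hj]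
          exact lcpNat_zero_of_ne_head _ _ _ _ hne
        · rw [List.drop_eq_nil_of_le hj, lcpNat_nil_right]
      · rw [List.drop_eq_nil_of_le hi, lcpNat_nil_left]
    omega

theorem kasaiWhile_lcp (seq : List Int) (i j h : Nat)
    (hle : h ≤ lcpNat (seq.drop i) (seq.drop j)) :
    kasaiWhile seq i j h = lcpNat (seq.drop i) (seq.drop j) := by
  rw [kasaiWhile_eq]
  exact (lcpNat_drop_add _ _ h hle).symm

theorem lcpNat_le_right (a b : List Int) : lcpNat a b ≤ b.length := by
  induction b generalizing a with
  | nil => cases a <;> simp [lcpNat]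
  | cons y b ih => cases a with
    | nil => simp [lcpNat]
    | cons x a => simp only [lcpNat]; split <;> simp; exact ih a

theorem lcpNat_mono_lt (a b c : List Int) (hab : a < b) (hbc : b < c) :
    lcpNat a c ≤ lcpNat b c := by
  induction c generalizing a b with
  | nil => exact absurd hbc (List.not_lt_nil b)
  | cons z c ih =>
    cases b with
    | nil => exact absurd hab (List.not_lt_nil a)
    | cons y b =>
      cases a with
      | nil => simp [lcpNat]
      | cons x a =>
        rw [List.cons_lt_cons_iff] at hab hbc
        simp only [lcpNat]
        rcases hab with hxy | ⟨hxy, hab⟩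
        · rcases hbc with hyz | ⟨hyz, _⟩
          · have hne : x ≠ z := ne_of_lt (lt_trans hxy hyz)
            simp [hne]
          · have hne : x ≠ z := by rw [← hyz]; exact ne_of_lt hxy
            simp [hne]
        · rcases hbc with hyz | ⟨hyz, hbc⟩
          · have hne : x ≠ z := by rw [hxy]; exact ne_of_lt hyz
            simp [hne]
          · subst hxy; subst hyz
            simp only [if_pos rfl]
            exact Nat.succ_le_succ (ih a b hab hbc)

theorem lcpNat_mono (a b c : List Int) (hab : a ≤ b) (hbc : b < c) :
    lcpNat a c ≤ lcpNat b c := by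
  rcases lt_or_eq_of_le hab with h | h
  · exact lcpNat_mono_lt a b c h hbc
  · subst h; exact le_rfl

-- instance bridge: the ports elaborate List-valued keys with core's `List.instLT`;
-- the PySem order lemmas use Mathlib's LinearOrder instance; the two are equal.
theorem sorted_listKey_instSwap {α : Type} (xs : List α) (key : α → List Int) (rev : Bool) :
    @PySem.List.sorted α (List Int) List.instLT (fun a b => a.decidableLT b) xs key rev
      = @PySem.List.sorted α (List Int) List.instLinearOrder.toLT LinearOrder.toDecidableLT xs key rev := by
  congr 1

theorem sorted2_listKey_instSwap {α : Type} (xs : List α) (k1 : α → List Int) (k2 : α → Int) (rev : Bool) :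
    @PySem.List.sorted2 α (List Int) Int List.instLT (fun a b => a.decidableLT b) _ _ xs k1 k2 rev
      = @PySem.List.sorted2 α (List Int) Int List.instLinearOrder.toLT LinearOrder.toDecidableLT _ _ xs k1 k2 rev := by
  congr 1

theorem sorted2_listKey2_instSwap {α : Type} (xs : List α) (k1 : α → Int) (k2 : α → List Int) (rev : Bool) :
    @PySem.List.sorted2 α Int (List Int) _ _ List.instLT (fun a b => a.decidableLT b) xs k1 k2 rev
      = @PySem.List.sorted2 α Int (List Int) _ _ List.instLinearOrder.toLT LinearOrder.toDecidableLT xs k1 k2 rev := by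
  congr 1

-- sorted2 is sorted with the lexicographic pair key
theorem sorted2_eq_sorted_lex {α κ₁ κ₂ : Type} [LinearOrder κ₁] [LinearOrder κ₂]
    (xs : List α) (k1 : α → κ₁) (k2 : α → κ₂) :
    PySem.List.sorted2 xs k1 k2 = PySem.List.sorted xs (fun a => toLex (k1 a, k2 a)) := by
  rw [PySem.List.sorted_eq_foldl_insertBy]
  unfold PySem.List.sorted2
  simp only
  congr 1
  funext acc x
  congr 1
  funext a b
  have : (toLex (k1 a, k2 a) < toLex (k1 b, k2 b)) ↔ (k1 a < k1 b ∨ (k1 a = k1 b ∧ k2 a < k2 b)) := by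
    exact Prod.Lex.lt_iff
  by_cases h1 : k1 a < k1 b
  · simp [this, h1]
  · by_cases h2 : k1 b < k1 a
    · have hl : ¬ (toLex (k1 a, k2 a) < toLex (k1 b, k2 b)) := by
        rw [this]
        rintro (h | ⟨he, _⟩)
        · exact h1 h
        · exact (ne_of_gt h2) he
      simp [hl, h1, h2]
    · have he : k1 a = k1 b := le_antisymm (not_lt.mp h2) (not_lt.mp h1)
      by_cases h3 : k2 a < k2 b
      · have hl : toLex (k1 a, k2 a) < toLex (k1 b, k2 b) := this.mpr (Or.inr ⟨he, h3⟩)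
        simp [hl, h1, h2, h3]
      · have hl : ¬ toLex (k1 a, k2 a) < toLex (k1 b, k2 b) := by
          rw [this]
          rintro (h | ⟨_, h⟩)
          · exact h1 h
          · exact h3 h
        simp [hl, h1, h2, h3]

-- pairwise-strict output of sorted under a key injective on a Nodup input
theorem sorted_pairwise_lt_of_inj {α κ : Type} [LinearOrder κ] (xs : List α) (key : α → κ)
    (hnd : xs.Nodup)
    (hinj : ∀ a ∈ xs, ∀ b ∈ xs, key a = key b → a = b) :
    (PySem.List.sorted xs key).Pairwise (fun a b => key a < key b) := by
  have hperm := PySem.List.sorted_perm xs key false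
  have hnd' : (PySem.List.sorted xs key).Nodup := hperm.nodup_iff.mpr hnd
  have hle := PySem.List.sorted_pairwise xs key
  have := List.Pairwise.and hle hnd'
  refine this.imp_of_mem ?_
  intro a b ha hb ⟨h1, h2⟩
  rcases lt_or_eq_of_le h1 with h | h
  · exact h
  · exact absurd (hinj a (hperm.mem_iff.mp ha) b (hperm.mem_iff.mp hb) h) h2

-- ===== suffix-array skeleton =====

def saN (seq : List Int) : List Nat := (bSa seq).map Int.toNat

theorem drop_inj (seq : List Int) (k l : Nat) (hk : k < seq.length) (hl : l < seq.length)
    (h : seq.drop k = seq.drop l) : k = l := by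
  have := congrArg List.length h
  simp [List.length_drop] at this
  omega

theorem bSa_perm (seq : List Int) :
    (bSa seq).Perm ((List.range seq.length).map (fun k : Nat => (k : Int))) := by
  unfold bSa
  rw [PySem.List.pyRange_zero_natCast]
  exact PySem.List.sorted_perm _ _ false

theorem bSa_eq_map (seq : List Int) : bSa seq = (saN seq).map (fun k : Nat => (k : Int)) := by
  unfold saN
  rw [List.map_map]
  have h : ∀ x ∈ bSa seq, ((fun k : Nat => (k : Int)) ∘ Int.toNat) x = id x := by
    intro x hx
    have hx' : x ∈ (List.range seq.length).map (fun k : Nat => (k : Int)) :=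
      (bSa_perm seq).mem_iff.mp hx
    obtain ⟨k, _, rfl⟩ := List.mem_map.mp hx'
    simp
  exact ((List.map_congr_left h).trans (List.map_id _)).symm

theorem saN_perm (seq : List Int) : (saN seq).Perm (List.range seq.length) := by
  have h := (bSa_perm seq).map Int.toNat
  rw [List.map_map] at h
  unfold saN
  simpa [Function.comp_def] using h

theorem saN_length (seq : List Int) : (saN seq).length = seq.length := by
  simpa using (saN_perm seq).length_eq

theorem saN_nodup (seq : List Int) : (saN seq).Nodup :=
  (saN_perm seq).nodup_iff.mpr (List.nodup_range)

theorem saN_mem (seq : List Int) (k : Nat) : k ∈ saN seq ↔ k < seq.length := by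
  rw [(saN_perm seq).mem_iff, List.mem_range]

theorem saN_pairwise (seq : List Int) :
    (saN seq).Pairwise (fun a b => seq.drop a < seq.drop b) := by
  have hnd : (PySem.List.pyRange 0 (seq.length : Int) 1).Nodup := by
    rw [PySem.List.pyRange_zero_natCast]
    exact (List.nodup_range).map (fun a b h => by exact_mod_cast h)
  have hmem : ∀ x ∈ PySem.List.pyRange 0 (seq.length : Int) 1,
      ∃ k : Nat, k < seq.length ∧ x = (k : Int) := by
    intro x hx
    rw [PySem.List.pyRange_zero_natCast] at hx
    obtain ⟨k, hk, rfl⟩ := List.mem_map.mp hx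
    exact ⟨k, List.mem_range.mp hk, rfl⟩
  have hp : (bSa seq).Pairwise (fun a b =>
      PySem.List.slice seq (some a) none < PySem.List.slice seq (some b) none) := by
    unfold bSa
    rw [sorted_listKey_instSwap]
    apply sorted_pairwise_lt_of_inj _ _ hnd
    intro a ha b hb hab
    obtain ⟨k, hk, rfl⟩ := hmem a ha
    obtain ⟨l, hl, rfl⟩ := hmem b hb
    rw [PySem.List.slice_from_natCast, PySem.List.slice_from_natCast] at hab
    exact congrArg (fun k : Nat => (k : Int)) (drop_inj seq k l hk hl hab)
  have := hp
  rw [bSa_eq_map seq, List.pairwise_map] at this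
  refine this.imp ?_
  intro a b h
  rwa [PySem.List.slice_from_natCast, PySem.List.slice_from_natCast] at h

def rkF (seq : List Int) (k : Nat) : Nat := (saN seq).idxOf k

theorem rkF_lt (seq : List Int) (k : Nat) (hk : k < seq.length) : rkF seq k < seq.length := by
  rw [← saN_length seq]
  exact List.idxOf_lt_length_of_mem ((saN_mem seq k).mpr hk)

theorem saN_rkF (seq : List Int) (k : Nat) (hk : k < seq.length) :
    (saN seq).getD (rkF seq k) 0 = k := by
  rw [List.getD_eq_getElem _ _ (by rw [saN_length]; exact rkF_lt seq k hk)]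
  exact List.getElem_idxOf _

-- the rank-scatter loop: rank[i] = r for each (r, i) in enumerate(sa)
def scatterF (L : List Int) (ri : Int × Int) : List Int := PySem.List.pySetD L ri.2 ri.1

theorem scatter_getD_notMem (v : List Nat) (L : List Int) (s : Int) (k : Nat) (hk : k ∉ v) :
    ((PySem.List.enumerate (v.map (fun k : Nat => (k : Int))) s).foldl scatterF L).getD k 0
      = L.getD k 0 := by
  induction v generalizing L s with
  | nil => rfl
  | cons x v ih =>
    rw [List.map_cons, PySem.List.enumerate_cons, List.foldl_cons]
    rw [ih _ _ (by simp at hk; exact hk.2)]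
    show (PySem.List.pySetD L (x : Int) s).getD k 0 = L.getD k 0
    rw [PySem.List.pySetD_natCast]
    rw [List.getD_eq_getElem?_getD, List.getD_eq_getElem?_getD,
      List.getElem?_set_ne (by simp at hk; exact fun h => hk.1 h.symm)]

theorem scatter_getD (v : List Nat) (hnd : v.Nodup) (L : List Int) (s : Int)
    (r : Nat) (hr : r < v.length) (hlt : v.getD r 0 < L.length) :
    ((PySem.List.enumerate (v.map (fun k : Nat => (k : Int))) s).foldl scatterF L).getD
      (v.getD r 0) 0 = s + (r : Int) := by
  induction v generalizing L s r with
  | nil => simp at hr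
  | cons x v ih =>
    rw [List.map_cons, PySem.List.enumerate_cons, List.foldl_cons]
    cases r with
    | zero =>
      simp only [List.getD_cons_zero] at hlt ⊢
      have hx : x ∉ v := (List.nodup_cons.mp hnd).1
      rw [scatter_getD_notMem v _ _ x hx]
      show (PySem.List.pySetD L (x : Int) s).getD x 0 = _
      rw [PySem.List.pySetD_natCast, List.getD_eq_getElem?_getD,
        List.getElem?_set_self hlt]
      simp
    | succ r =>
      simp only [List.getD_cons_succ] at hlt ⊢
      simp only [scatterF]
      have := ih (List.nodup_cons.mp hnd).2
        (PySem.List.pySetD L (x : Int) s) (s + 1) r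
        (by simpa using Nat.lt_of_succ_lt_succ hr)
        (by show _ < (PySem.List.pySetD L _ _).length
            rw [PySem.List.length_pySetD]; exact hlt)
      rw [this]
      push_cast
      ring

theorem saN_getD_lt (seq : List Int) (r : Nat) (hr : r < seq.length) :
    (saN seq).getD r 0 < seq.length := by
  rw [← saN_mem seq]
  rw [List.getD_eq_getElem _ _ (by rw [saN_length]; exact hr)]
  exact List.getElem_mem _

theorem rkF_saN (seq : List Int) (r : Nat) (hr : r < seq.length) :
    rkF seq ((saN seq).getD r 0) = r := by
  unfold rkF
  rw [List.getD_eq_getElem _ _ (by rw [saN_length]; exact hr)]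
  exact (saN_nodup seq).idxOf_getElem r _

theorem suf_lt_of_rkF_lt (seq : List Int) (a b : Nat) (ha : a < seq.length)
    (hb : b < seq.length) (h : rkF seq a < rkF seq b) :
    seq.drop a < seq.drop b := by
  have hp := (List.pairwise_iff_getElem).mp (saN_pairwise seq)
  have h1 : rkF seq a < (saN seq).length := by rw [saN_length]; exact rkF_lt seq a ha
  have h2 : rkF seq b < (saN seq).length := by rw [saN_length]; exact rkF_lt seq b hb
  have := hp (rkF seq a) (rkF seq b) h1 h2 h
  rwa [← List.getD_eq_getElem _ 0 h1, ← List.getD_eq_getElem _ 0 h2,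
    saN_rkF seq a ha, saN_rkF seq b hb] at this

theorem rkF_lt_of_suf_lt (seq : List Int) (a b : Nat) (ha : a < seq.length)
    (hb : b < seq.length) (h : seq.drop a < seq.drop b) :
    rkF seq a < rkF seq b := by
  rcases lt_trichotomy (rkF seq a) (rkF seq b) with hc | hc | hc
  · exact hc
  · exfalso
    have heq : (saN seq).getD (rkF seq a) 0 = (saN seq).getD (rkF seq b) 0 := by rw [hc]
    rw [saN_rkF seq a ha, saN_rkF seq b hb] at heq
    subst heq
    exact lt_irrefl _ h
  · exact absurd (suf_lt_of_rkF_lt seq b a hb ha hc) (lt_asymm h)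

theorem suf_le_of_rkF_le (seq : List Int) (a b : Nat) (ha : a < seq.length)
    (hb : b < seq.length) (h : rkF seq a ≤ rkF seq b) :
    seq.drop a ≤ seq.drop b := by
  rcases lt_or_eq_of_le h with h' | h'
  · exact le_of_lt (suf_lt_of_rkF_lt seq a b ha hb h')
  · have heq : (saN seq).getD (rkF seq a) 0 = (saN seq).getD (rkF seq b) 0 := by rw [h']
    rw [saN_rkF seq a ha, saN_rkF seq b hb] at heq
    subst heq; exact le_rfl

theorem bRank_getD (seq : List Int) (i : Nat) (hi : i < seq.length) :
    (bRank seq).getD i 0 = ((rkF seq i : Nat) : Int) := by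
  unfold bRank
  rw [bSa_eq_map seq, PySem.List.pyRepeat_singleton]
  have hfold : (fun (rk : List Int) (ri : Int × Int) => PySem.List.pySetD rk ri.2 ri.1)
      = scatterF := rfl
  rw [hfold]
  have hv : i = (saN seq).getD (rkF seq i) 0 := (saN_rkF seq i hi).symm
  conv_lhs => rw [hv]
  rw [scatter_getD (saN seq) (saN_nodup seq) _ 0 (rkF seq i)
    (by rw [saN_length]; exact rkF_lt seq i hi)
    (by rw [List.length_replicate, Int.toNat_natCast, ← hv]; exact hi)]
  simp

-- ===== Kasai main loop =====

def kasaiInit (seq : List Int) : List Int × Nat :=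
  (PySem.List.pyRepeat [0] ((seq.length : Int) - 1), 0)

def kasaiStM (seq : List Int) (m : Nat) : List Int × Nat :=
  List.foldl (fun st (k : Nat) => bKasaiStep seq st (k : Int)) (kasaiInit seq) (List.range m)

def KasaiInv (seq : List Int) (m : Nat) (st : List Int × Nat) : Prop :=
  st.1.length = seq.length - 1 ∧
  (∀ t, t + 1 < seq.length → (saN seq).getD (t+1) 0 < m →
    st.1.getD t 0 = (lcpNat (seq.drop ((saN seq).getD t 0)) (seq.drop ((saN seq).getD (t+1) 0)) : Int)) ∧
  (m < seq.length → 0 < rkF seq m →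
    st.2 ≤ lcpNat (seq.drop m) (seq.drop ((saN seq).getD (rkF seq m - 1) 0)))

theorem lcpNat_head_step (seq : List Int) (a b : Nat) (ha : a < seq.length) (hb : b < seq.length)
    (h1 : 1 ≤ lcpNat (seq.drop a) (seq.drop b)) :
    seq[a]'ha = seq[b]'hb ∧
      lcpNat (seq.drop a) (seq.drop b) = lcpNat (seq.drop (a+1)) (seq.drop (b+1)) + 1 := by
  rw [List.drop_eq_getElem_cons ha, List.drop_eq_getElem_cons hb] at h1 ⊢
  by_cases he : seq[a]'ha = seq[b]'hb
  · exact ⟨he, by simp [lcpNat, he]⟩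
  · simp [lcpNat, he] at h1

theorem kasai_step (seq : List Int) (m : Nat) (hm : m < seq.length) (st : List Int × Nat)
    (hInv : KasaiInv seq m st) :
    KasaiInv seq (m+1) (bKasaiStep seq st (m : Int)) := by
  obtain ⟨hlen, hgood, hh⟩ := hInv
  have hr : PySem.List.pyGetD (bRank seq) (m : Int) 0 = ((rkF seq m : Nat) : Int) := by
    rw [PySem.List.pyGetD_natCast]
    exact bRank_getD seq m hm
  unfold bKasaiStep
  simp only [hr]
  by_cases hpos : 0 < rkF seq m
  · rw [if_pos (by exact_mod_cast hpos)]
    -- j = saN.getD (rkF m - 1)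
    have hcast1 : ((rkF seq m : Nat) : Int) - 1 = ((rkF seq m - 1 : Nat) : Int) := by
      push_cast [hpos]; omega
    have hj : PySem.List.pyGetD (bSa seq) (((rkF seq m : Nat) : Int) - 1) 0
        = (((saN seq).getD (rkF seq m - 1) 0 : Nat) : Int) := by
      rw [hcast1, bSa_eq_map seq]
      have h0 : (0 : Int) = ((0 : Nat) : Int) := rfl
      rw [h0, PySem.List.pyGetD_map (fun k : Nat => (k : Int)) (saN seq) _ 0,
        PySem.List.pyGetD_natCast]
    set j0 := (saN seq).getD (rkF seq m - 1) 0 with hj0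
    have hrm1 : rkF seq m - 1 < seq.length := by
      have := rkF_lt seq m hm; omega
    have hj0n : j0 < seq.length := saN_getD_lt seq _ hrm1
    have hrkj0 : rkF seq j0 = rkF seq m - 1 := rkF_saN seq _ hrm1
    -- the while loop computes the true lcp
    have hwhile : kasaiWhile seq ((m : Int)).toNat ((((j0 : Nat) : Int)).toNat) st.2
        = lcpNat (seq.drop m) (seq.drop j0) := by
      rw [Int.toNat_natCast, Int.toNat_natCast]
      exact kasaiWhile_lcp seq m j0 st.2 (hh hm hpos)
    rw [hj]
    simp only [hwhile]
    set h' := lcpNat (seq.drop m) (seq.drop j0) with hh'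
    refine ⟨?_, ?_, ?_⟩
    · simp only []
      rw [hcast1, PySem.List.pySetD_natCast]
      rw [List.length_set]
      exact hlen
    · intro t ht1 htm
      simp only []
      rw [hcast1, PySem.List.pySetD_natCast]
      by_cases hteq : (saN seq).getD (t+1) 0 = m
      · have htr : t + 1 = rkF seq m := by
          rw [← hteq]; exact (rkF_saN seq (t+1) ht1).symm
        have htr' : t = rkF seq m - 1 := by omega
        rw [List.getD_eq_getElem?_getD, htr', List.getElem?_set_self (by rw [hlen]; omega)]
        simp only [Option.getD_some]
        have e2 : (saN seq).getD (rkF seq m - 1 + 1) 0 = m := by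
          rw [show rkF seq m - 1 + 1 = rkF seq m by omega]
          exact saN_rkF seq m hm
        rw [e2, ← hj0, lcpNat_comm, hh']
      · have htm' : (saN seq).getD (t+1) 0 < m := by omega
        have htne : t ≠ rkF seq m - 1 := by
          intro hc
          apply hteq
          have : t + 1 = rkF seq m := by omega
          rw [this]
          exact congrArg (fun r => (saN seq).getD r 0) rfl |>.trans (by rw [saN_rkF seq m hm])
        rw [List.getD_eq_getElem?_getD, List.getElem?_set_ne (by omega),
          ← List.getD_eq_getElem?_getD]
        exact hgood t ht1 htm'
    · intro hm1 hq
      simp only []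
      set q := rkF seq (m+1) with hqdef
      by_cases hzero : h' > 0
      · rw [if_pos hzero]
        -- h' ≥ 1 : heads of suffixes m and j0 agree
        obtain ⟨hhead, hstep⟩ := lcpNat_head_step seq m j0 hm hj0n (by omega)
        by_cases hend : j0 + 1 < seq.length
        · -- tails comparison
          have hlt_j0m : seq.drop j0 < seq.drop m := by
            apply suf_lt_of_rkF_lt seq j0 m hj0n hm
            rw [hrkj0]; omega
          have htail_lt : seq.drop (j0+1) < seq.drop (m+1) := by
            rw [List.drop_eq_getElem_cons hj0n, List.drop_eq_getElem_cons hm] at hlt_j0m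
            rcases List.cons_lt_cons_iff.mp hlt_j0m with hc | ⟨_, hc⟩
            · rw [hhead] at hc; exact absurd hc (lt_irrefl _)
            · exact hc
          have hrk_tail : rkF seq (j0+1) < q :=
            rkF_lt_of_suf_lt seq (j0+1) (m+1) hend hm1 htail_lt
          have hq1 : q - 1 < seq.length := by
            have := rkF_lt seq (m+1) hm1; omega
          have hle1 : seq.drop (j0+1) ≤ seq.drop ((saN seq).getD (q-1) 0) := by
            apply suf_le_of_rkF_le seq (j0+1) _ hend (saN_getD_lt seq _ hq1)
            rw [rkF_saN seq _ hq1]; omega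
          have hlt2 : seq.drop ((saN seq).getD (q-1) 0) < seq.drop (m+1) := by
            apply suf_lt_of_rkF_lt seq _ (m+1) (saN_getD_lt seq _ hq1) hm1
            rw [rkF_saN seq _ hq1]; omega
          have hmono := lcpNat_mono (seq.drop (j0+1)) (seq.drop ((saN seq).getD (q-1) 0))
            (seq.drop (m+1)) hle1 hlt2
          have hc1 := lcpNat_comm (seq.drop (j0+1)) (seq.drop (m+1))
          have hc2 := lcpNat_comm (seq.drop (m+1)) (seq.drop ((saN seq).getD (q-1) 0))
          omega
        · -- j0 is the last position: h' ≤ 1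
          have : h' ≤ 1 := by
            have := lcpNat_le_right (seq.drop m) (seq.drop j0)
            rw [List.length_drop] at this
            omega
          omega
      · rw [if_neg hzero]
        omega
  · rw [if_neg (by exact_mod_cast hpos)]
    refine ⟨hlen, ?_, fun _ _ => Nat.zero_le _⟩
    intro t ht1 htm
    by_cases hteq : (saN seq).getD (t+1) 0 = m
    · exfalso
      have : rkF seq ((saN seq).getD (t+1) 0) = t + 1 := rkF_saN seq (t+1) ht1
      rw [hteq] at this
      omega
    · exact hgood t ht1 (by omega)

theorem kasai_inv_all (seq : List Int) (m : Nat) (hm : m ≤ seq.length) :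
    KasaiInv seq m (kasaiStM seq m) := by
  induction m with
  | zero =>
    refine ⟨?_, ?_, ?_⟩
    · show (PySem.List.pyRepeat [0] ((seq.length : Int) - 1)).length = seq.length - 1
      rw [PySem.List.pyRepeat_singleton, List.length_replicate]
      omega
    · intro t _ h; omega
    · intro _ _; exact Nat.zero_le _
  | succ m ih =>
    have := kasai_step seq m (by omega) (kasaiStM seq m) (ih (by omega))
    unfold kasaiStM at this ⊢
    rw [List.range_succ, List.foldl_append, List.foldl_cons, List.foldl_nil]
    exact this

theorem kasai_final (seq : List Int) (t : Nat) (ht : t + 1 < seq.length) :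
    ((kasaiStM seq seq.length).1).getD t 0
      = (lcpNat (seq.drop ((saN seq).getD t 0)) (seq.drop ((saN seq).getD (t+1) 0)) : Int) := by
  obtain ⟨_, hgood, _⟩ := kasai_inv_all seq seq.length le_rfl
  exact hgood t ht (saN_getD_lt seq (t+1) ht)

-- ===== shared pipeline objects =====

def sufT (seq : List Int) (t : Nat) : List Int := seq.drop ((saN seq).getD t 0)

def lcpT (seq : List Int) (t : Nat) : Nat := lcpNat (sufT seq t) (sufT seq (t+1))

def prefT (seq : List Int) (t : Nat) : List Int := (sufT seq t).take (lcpT seq t)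

abbrev condT (seq : List Int) (ml : Int) (t : Nat) : Prop :=
  ((lcpT seq t : Nat) : Int) ≥ ml ∧ ((lcpT seq t : Nat) : Int) > 0

def goodT (seq : List Int) (ml : Int) : List Nat :=
  (List.range (seq.length - 1)).filter (fun t => decide (condT seq ml t))

def prefList (seq : List Int) (ml : Int) : List (List Int) := (goodT seq ml).map (prefT seq)

theorem prefT_length (seq : List Int) (t : Nat) : (prefT seq t).length = lcpT seq t := by
  unfold prefT
  rw [List.length_take]
  exact min_eq_left (lcpNat_le_left _ _)

theorem pyRange_nm1 (n : Nat) :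
    PySem.List.pyRange 0 ((n : Int) - 1) 1 = (List.range (n-1)).map (fun k : Nat => (k : Int)) := by
  cases n with
  | zero => rfl
  | succ m =>
    have : ((m + 1 : Nat) : Int) - 1 = ((m : Nat) : Int) := by push_cast; ring
    rw [this, PySem.List.pyRange_zero_natCast]
    simp

-- ===== port A: the sorted suffix list =====

theorem build_suffixes_eq (seq : List Int) :
    build_suffixes seq = (saN seq).map (fun k => (seq.drop k, (k : Int))) := by
  unfold build_suffixes
  rw [sorted2_listKey_instSwap]
  rw [sorted2_eq_sorted_lex]
  apply PySem.List.sorted_eq_of_perm_of_pairwise_lt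
  · -- permutation
    have h1 : ((saN seq).map (fun k => (seq.drop k, (k : Int)))).Perm
        ((List.range seq.length).map (fun k => (seq.drop k, (k : Int)))) :=
      (saN_perm seq).map _
    refine h1.trans ?_
    rw [PySem.List.pyRange_zero_natCast, List.map_map]
    apply List.Perm.of_eq
    apply List.map_congr_left
    intro k _
    simp only [Function.comp_apply]
    rw [PySem.List.slice_from_natCast]
  · -- strictly increasing in the Lex key
    rw [List.pairwise_map]
    refine (saN_pairwise seq).imp ?_
    intro a b h
    exact Prod.Lex.lt_iff.mpr (Or.inl h)

theorem lcp_length_eq (a b : List Int) : lcp_length a b = ((lcpNat a b : Nat) : Int) := by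
  unfold lcp_length
  rw [lcpLoopA_eq]
  simp

-- ===== port A: the adjacent-pair LCP list =====


theorem suffixes_fst (seq : List Int) (t : Nat) (ht : t < seq.length) :
    (PySem.List.pyGetD (build_suffixes seq) (t : Int) ([], 0)).1 = sufT seq t := by
  rw [build_suffixes_eq, PySem.List.pyGetD_natCast]
  rw [List.getD_eq_getElem _ _ (by rw [List.length_map, saN_length]; exact ht)]
  rw [List.getElem_map]
  unfold sufT
  rw [List.getD_eq_getElem _ 0 (by rw [saN_length]; exact ht)]

theorem aLcps_eq (seq : List Int) (ml : Int) :
    aLcps seq ml = (goodT seq ml).map (fun t => (((lcpT seq t : Nat) : Int), prefT seq t)) := by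
  unfold aLcps
  rw [build_suffixes_eq, List.length_map, saN_length, ← build_suffixes_eq, pyRange_nm1,
    List.foldl_map]
  rw [PySem.List.foldl_congr_mem _ _
    (fun acc t => if condT seq ml t then acc ++ [(((lcpT seq t : Nat) : Int), prefT seq t)] else acc) _
    ?_]
  · rw [PySem.List.foldl_append_ite (condT seq ml)
      (fun t => (((lcpT seq t : Nat) : Int), prefT seq t))]
    rfl
  · intro acc t ht
    have htn : t < seq.length - 1 := List.mem_range.mp ht
    have h1 : t < seq.length := by omega
    have h2 : t + 1 < seq.length := by omega
    have hc1 : ((t : Nat) : Int) + 1 = ((t + 1 : Nat) : Int) := by push_cast; ring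
    simp only [hc1, suffixes_fst seq t h1, suffixes_fst seq (t+1) h2, lcp_length_eq]
    unfold condT lcpT prefT
    rw [PySem.List.slice_to_natCast]
    unfold lcpT
    rfl


-- ===== port A: the dedup dictionary keeps each prefix once, with its length =====

theorem dict_fold_items (ps : List (List Int)) :
    ((ps.map (fun p => (((p.length : Nat) : Int), p))).foldl
      (fun (u : PySem.Dict (List Int) Int) lp =>
        if ¬ (u.contains lp.2 = true) ∨ lp.1 > u.getD lp.2 0 then u.insert lp.2 lp.1 else u)
      PySem.Dict.empty).items
    = (PySem.Set.ofList ps).map (fun p => (p, ((p.length : Nat) : Int))) := by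
  induction ps using List.reverseRecOn with
  | nil => rfl
  | append_singleton ps p ih =>
    rw [List.map_append, List.foldl_append, PySem.Set.ofList_append_singleton]
    simp only [List.map_cons, List.map_nil, List.foldl_cons, List.foldl_nil]
    set u := ((ps.map (fun p => (((p.length : Nat) : Int), p))).foldl
      (fun (u : PySem.Dict (List Int) Int) lp =>
        if ¬ (u.contains lp.2 = true) ∨ lp.1 > u.getD lp.2 0 then u.insert lp.2 lp.1 else u)
      PySem.Dict.empty) with hu
    have hkeys : u.keys = PySem.Set.ofList ps := by
      show u.items.map Prod.fst = _
      rw [ih, List.map_map]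
      have hid : (Prod.fst ∘ fun p : List Int => (p, ((p.length : Nat) : Int))) = id := rfl
      rw [hid, List.map_id]
    have hmem : u.contains p = true ↔ p ∈ PySem.Set.ofList ps := by
      rw [PySem.Dict.contains_iff_mem_keys, hkeys]
    by_cases hp : p ∈ PySem.Set.ofList ps
    · have hc : u.contains p = true := hmem.mpr hp
      have hgd : u.getD p 0 = ((p.length : Nat) : Int) := by
        apply PySem.Dict.getD_of_mem_items u (v := ((p.length : Nat) : Int))
        · rw [ih]
          exact List.mem_map.mpr ⟨p, hp, rfl⟩
        · rw [hkeys]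
          exact PySem.Set.nodup_ofList _
      rw [if_neg (by simp [hc, hgd])]
      rw [ih, PySem.Set.add_of_mem hp]
    · have hc : u.contains p = false := by
        rcases Bool.eq_false_or_eq_true (u.contains p) with h | h
        · exact absurd (hmem.mp h) hp
        · exact h
      rw [if_pos (by simp [hc])]
      rw [PySem.Dict.items_insert_of_not_contains u _ hc, ih,
        PySem.Set.add_of_not_mem hp, List.map_append]
      rfl

-- ===== port B: the collected set of prefixes =====

theorem bSa_getD (seq : List Int) (t : Nat) (ht : t < seq.length) :
    PySem.List.pyGetD (bSa seq) (t : Int) 0 = (((saN seq).getD t 0 : Nat) : Int) := by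
  rw [bSa_eq_map seq]
  have h0 : (0 : Int) = ((0 : Nat) : Int) := rfl
  rw [h0, PySem.List.pyGetD_map (fun k : Nat => (k : Int)) (saN seq) _ 0,
    PySem.List.pyGetD_natCast]

theorem bLcp_eq (seq : List Int) : bLcp seq = (kasaiStM seq seq.length).1 := by
  unfold bLcp
  rw [PySem.List.pyRange_zero_natCast, List.foldl_map]
  rfl

theorem foundB_eq (seq : List Int) (ml : Int) :
    bFound seq ml = PySem.Set.ofList (prefList seq ml) := by
  unfold bFound
  rw [bLcp_eq]
  rw [pyRange_nm1, List.foldl_map]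
  rw [PySem.List.foldl_congr_mem _ _
    (fun (s : PySem.Set (List Int)) t =>
      if condT seq ml t then PySem.Set.add s (prefT seq t) else s) _ ?_]
  · rw [PySem.List.foldl_ite_eq_foldl_filter (condT seq ml)
      (fun (s : PySem.Set (List Int)) t => PySem.Set.add s (prefT seq t))]
    rw [← PySem.Set.update_map_eq_foldl_add]
    rw [PySem.Set.update_empty]
    rfl
  · intro s t ht
    have htn : t < seq.length - 1 := List.mem_range.mp ht
    have h1 : t < seq.length := by omega
    have h2 : t + 1 < seq.length := by omega
    have hl : PySem.List.pyGetD (kasaiStM seq seq.length).1 (t : Int) 0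
        = ((lcpT seq t : Nat) : Int) := by
      rw [PySem.List.pyGetD_natCast]
      exact kasai_final seq t h2
    simp only [hl, bSa_getD seq t h1]
    have hsl : PySem.List.slice seq (some (((saN seq).getD t 0 : Nat) : Int))
        (some ((((saN seq).getD t 0 : Nat) : Int) + ((lcpT seq t : Nat) : Int)))
        = prefT seq t := by
      rw [PySem.List.slice_natCast_add]
      rfl
    rw [hsl]

-- ===== the final sorts agree =====

theorem toLex_negLen_inj (a b : List Int)
    (h : (toLex (-(PySem.List.len a), a) : Lex (Int × List Int)) = toLex (-(PySem.List.len b), b)) :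
    a = b := by
  have := congrArg (fun x => (ofLex x).2) h
  simpa using this

theorem final_sorts_eq (seq : List Int) (ml : Int) :
    (PySem.List.sorted2 (((PySem.Set.ofList (prefList seq ml)) : List (List Int)).map
        (fun p => (p, ((p.length : Nat) : Int))))
      (fun it => -it.2) (fun it => it.1)).map (fun pl => (pl.2, pl.1))
    = (PySem.List.sorted2 ((PySem.Set.ofList (prefList seq ml)) : List (List Int))
        (fun p => -(PySem.List.len p)) (fun p => p)).map (fun p => (PySem.List.len p, p)) := by
  set P : List (List Int) := PySem.Set.ofList (prefList seq ml) with hP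
  have hnd : P.Nodup := PySem.Set.nodup_ofList _
  rw [sorted2_listKey2_instSwap, sorted2_listKey2_instSwap]
  rw [sorted2_eq_sorted_lex, sorted2_eq_sorted_lex]
  set KB : List Int → Lex (Int × List Int) := fun p => toLex (-(PySem.List.len p), p) with hKB
  have hzpw : (PySem.List.sorted P KB).Pairwise (fun a b => KB a < KB b) := by
    apply sorted_pairwise_lt_of_inj P KB hnd
    intro a _ b _ h
    exact toLex_negLen_inj a b h
  have hzp : (PySem.List.sorted P KB).Perm P := PySem.List.sorted_perm P KB false
  have hA : PySem.List.sorted (P.map (fun p => (p, ((p.length : Nat) : Int))))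
      (fun it => toLex (-it.2, it.1))
      = (PySem.List.sorted P KB).map (fun p => (p, ((p.length : Nat) : Int))) := by
    apply PySem.List.sorted_eq_of_perm_of_pairwise_lt
    · exact hzp.map _
    · rw [List.pairwise_map]
      refine hzpw.imp ?_
      intro a b h
      exact h
  rw [hA, List.map_map]
  rfl

-- ===== VERDICT (by name: the statement is the Claim_ definition above) =====
theorem find_lcps_spec : Claim_equal_find_lcps := by
  intro seq ml _
  show find_lcps seq ml = find_lcps_alt seq ml
  unfold find_lcps find_lcps_alt aUnique
  rw [aLcps_eq]
  have hmm : (goodT seq ml).map (fun t => (((lcpT seq t : Nat) : Int), prefT seq t))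
      = (prefList seq ml).map (fun p => (((p.length : Nat) : Int), p)) := by
    unfold prefList
    rw [List.map_map]
    apply List.map_congr_left
    intro t _
    simp only [Function.comp_apply, prefT_length]
  rw [hmm, dict_fold_items, foundB_eq]
  exact final_sorts_eq seq ml
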